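-- pv_equiv track=rewrite | github.com/shvetsantonyx/Film-Searcher | os_walker_1.py | text_reader
-- ===== SOURCE A (Python) =====
-- def text_reader(text):
--     string_1 = ''
--     num_str = ''
--     for i in text:
--         if i.isnumeric() == True:
--             num_str += i
--             string_1 += i
--             if len(num_str) == 4 and num_str.startswith('20') or len(num_str) == 4 and num_str.startswith('19'):
--                 break
--         else:
--             string_1 += i
--     new_str = string_1.replace('.', ' ').replace('(', '')
--     return new_str
-- ===== SOURCE B (Python) =====
-- def text_reader(text):
--     # digit-position index built once, then slice; same result as the scan-and-break original
--     pairs = [(i, ch) for i, ch in enumerate(text) if ch.isnumeric()]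
--     cut = len(text)
--     if len(pairs) >= 4:
--         first4 = ''.join(ch for _, ch in pairs[:4])
--         if first4.startswith('20') or first4.startswith('19'):
--             cut = pairs[3][0] + 1
--     return text[:cut].replace('.', ' ').replace('(', '')
-- ===== Notes on version B (the rewrite author's own statement) =====
-- stated objective: alternative
-- what changed: B replaces A's single accumulate-while-scanning loop with a mid-loop break (two growing string accumulators) by a two-phase decomposition: build the digit-position index once with a comprehension, decide the cut point from the first four indexed digits, and return one slice; same linear cost.
import Mathlib
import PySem

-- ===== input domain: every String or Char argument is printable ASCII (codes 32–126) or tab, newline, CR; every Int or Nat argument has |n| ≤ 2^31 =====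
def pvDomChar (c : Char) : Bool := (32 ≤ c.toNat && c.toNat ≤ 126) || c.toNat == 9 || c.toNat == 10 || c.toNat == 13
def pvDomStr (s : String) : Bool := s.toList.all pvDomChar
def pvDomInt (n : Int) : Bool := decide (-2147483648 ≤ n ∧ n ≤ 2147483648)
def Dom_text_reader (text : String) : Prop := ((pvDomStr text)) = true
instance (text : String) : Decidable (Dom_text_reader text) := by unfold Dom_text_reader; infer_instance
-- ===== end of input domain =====

-- B replaces A's accumulate-and-break character scan by a digit-position index built once,
-- then a single slice (objective: alternative decomposition, same linear cost).
-- `ch.isnumeric()` is ported as PySem.Chars.isdigit — exact on the ASCII domain Dom_text_reader.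

-- ===== PORT A =====
-- A's break condition (the Python `len(num_str)==4 and num_str.startswith(...)` expression, named)
def pvOk4 (l : List Char) : Bool :=
  (l.length == 4 && PySem.Chars.startswith l ['2', '0']) ||
  (l.length == 4 && PySem.Chars.startswith l ['1', '9'])

-- the for-loop with its two accumulators and the mid-loop break
def pvLoopA : List Char → List Char → List Char → List Char
  | [], s1, _ => s1
  | c :: rest, s1, num =>
    if PySem.Chars.isdigit c then
      let num' := num ++ [c]
      let s1' := s1 ++ [c]
      if pvOk4 num' then s1'   -- break
      else pvLoopA rest s1' num'
    else pvLoopA rest (s1 ++ [c]) num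

def text_reader (text : String) : String :=
  String.ofList
    (PySem.Chars.replace (PySem.Chars.replace (pvLoopA text.toList [] []) ['.'] [' ']) ['('] [])

-- ===== PORT B =====
-- B's year test (`first4.startswith('20') or first4.startswith('19')`, named)
def pvOk2 (l : List Char) : Bool :=
  PySem.Chars.startswith l ['2', '0'] || PySem.Chars.startswith l ['1', '9']

def text_reader_alt (text : String) : String :=
  let cs := text.toList
  let pairs := (PySem.List.enumerate cs).filter (fun p => PySem.Chars.isdigit p.2)
  let cut : Int :=
    if 4 ≤ pairs.length then
      -- first4 = ''.join(ch for _, ch in pairs[:4])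
      let first4 := (PySem.List.slice pairs none (some 4)).map (fun p => p.2)
      if pvOk2 first4 then
        (PySem.List.pyGetD pairs 3 (0, ' ')).1 + 1    -- pairs[3][0] + 1; index in range by the guard
      else (cs.length : Int)
    else (cs.length : Int)
  String.ofList
    (PySem.Chars.replace (PySem.Chars.replace (PySem.List.slice cs none (some cut)) ['.'] [' ']) ['('] [])

-- ===== PRECONDITION & SPEC =====
def Spec_text_reader (text : String) (out : String) : Prop := out = text_reader_alt text
instance (text : String) (out : String) : Decidable (Spec_text_reader text out) := by unfold Spec_text_reader; infer_instance

-- ===== CLAIM (what is proved, stated in full; the proofs are below) =====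
def Claim_equal_text_reader : Prop := ∀ (text : String), Dom_text_reader text → Spec_text_reader text (text_reader text)

-- ===== LEMMAS AND PROOFS =====

-- number of characters A's loop consumes, given the digits seen so far
def pvCut (num : List Char) : List Char → Nat
  | [] => 0
  | c :: rest =>
    if PySem.Chars.isdigit c then
      if pvOk4 (num ++ [c]) then 1 else pvCut (num ++ [c]) rest + 1
    else pvCut num rest + 1

-- Nat-level digit-position index (B's `pairs`, with Nat positions)
def pvIdp : List Char → List (Nat × Char)
  | [] => []
  | c :: rest =>
    if PySem.Chars.isdigit c then (0, c) :: (pvIdp rest).map (fun p => (p.1 + 1, p.2))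
    else (pvIdp rest).map (fun p => (p.1 + 1, p.2))

-- B's cut, at Nat level
def pvCutN (cs : List Char) : Nat :=
  if 4 ≤ (pvIdp cs).length ∧ pvOk2 (((pvIdp cs).take 4).map (fun p => p.2)) = true
  then ((pvIdp cs).getD 3 (0, ' ')).1 + 1 else cs.length

theorem pvLoopA_eq_take (cs : List Char) : ∀ s1 num,
    pvLoopA cs s1 num = s1 ++ cs.take (pvCut num cs) := by
  induction cs with
  | nil => intro s1 num; simp [pvLoopA, pvCut]
  | cons c rest ih =>
    intro s1 num
    by_cases hd : PySem.Chars.isdigit c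
    · by_cases hb : pvOk4 (num ++ [c]) = true
      · simp [pvLoopA, pvCut, hd, hb]
      · simp [pvLoopA, pvCut, hd, hb, ih, List.take_succ_cons, List.append_assoc]
    · simp [pvLoopA, pvCut, hd, ih, List.take_succ_cons, List.append_assoc]

theorem pvCut_of_full (cs : List Char) : ∀ num, 4 ≤ num.length →
    pvCut num cs = cs.length := by
  induction cs with
  | nil => intro num _; simp [pvCut]
  | cons c rest ih =>
    intro num h
    by_cases hd : PySem.Chars.isdigit c
    · have hb4 : pvOk4 (num ++ [c]) = false := by simp [pvOk4]; omega
      have h' : 4 ≤ (num ++ [c]).length := by simp; omega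
      simp [pvCut, hd, hb4, ih _ h']
    · simp [pvCut, hd, ih _ h]

-- getD through the position-shift map, in range
theorem pvGetD_shift (l : List (Nat × Char)) (i : Nat) (d : Nat × Char) (h : i < l.length) :
    (l.map (fun p => (p.1 + 1, p.2))).getD i d = ((l.getD i d).1 + 1, (l.getD i d).2) := by
  simp [List.getD_eq_getElem?_getD, h]

-- the core correspondence: A's consumed length equals B's index-based cut
theorem pvCut_eq (cs : List Char) : ∀ num, num.length < 4 →
    pvCut num cs =
      (if 4 ≤ num.length + (pvIdp cs).length ∧
          pvOk2 ((num ++ (pvIdp cs).map (fun p => p.2)).take 4) = true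
       then ((pvIdp cs).getD (3 - num.length) (0, ' ')).1 + 1 else cs.length) := by
  induction cs with
  | nil =>
    intro num hn
    simp only [pvIdp, pvCut]
    rw [if_neg (by rintro ⟨h1, _⟩; simp at h1; omega)]
    simp
  | cons c rest ih =>
    intro num hn
    by_cases hd : PySem.Chars.isdigit c
    · have hidp : pvIdp (c :: rest) = (0, c) :: (pvIdp rest).map (fun p => (p.1 + 1, p.2)) := by
        simp [pvIdp, hd]
      have hms : (pvIdp (c :: rest)).map (fun p => p.2) =
          c :: (pvIdp rest).map (fun p => p.2) := by rw [hidp]; simp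
      have hlen : (pvIdp (c :: rest)).length = (pvIdp rest).length + 1 := by rw [hidp]; simp
      by_cases h3 : num.length = 3
      · -- the fourth digit: A checks the year test and breaks (or never breaks again)
        have htake : ∀ l : List Char, (num ++ c :: l).take 4 = num ++ [c] := by
          intro l
          rw [show num ++ c :: l = (num ++ [c]) ++ l by simp,
            List.take_append_of_le_length (by simp [h3]),
            List.take_of_length_le (by simp [h3])]
        have hok : pvOk2 ((num ++ (pvIdp (c :: rest)).map (fun p => p.2)).take 4) =
            pvOk2 (num ++ [c]) := by rw [hms, htake]
        by_cases hb : pvOk2 (num ++ [c]) = true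
        · have hb4 : pvOk4 (num ++ [c]) = true := by
            simp [pvOk4, pvOk2] at hb ⊢; simp [h3]; tauto
          rw [show pvCut num (c :: rest) = 1 by simp [pvCut, hd, hb4]]
          rw [if_pos ⟨by rw [hlen]; omega, by rw [hok]; exact hb⟩, hidp]
          simp [h3]
        · have hb4 : pvOk4 (num ++ [c]) = false := by
            simp [pvOk4, pvOk2] at hb ⊢; tauto
          rw [show pvCut num (c :: rest) = rest.length + 1 by
                simp [pvCut, hd, hb4, pvCut_of_full rest (num ++ [c]) (by simp [h3])]]
          rw [if_neg (by rintro ⟨_, hk⟩; rw [hok] at hk; exact hb hk)]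
          simp
      · -- an earlier digit: shift the index by one and recurse
        have hn' : (num ++ [c]).length < 4 := by simp; omega
        have hb4 : pvOk4 (num ++ [c]) = false := by simp [pvOk4]; omega
        rw [show pvCut num (c :: rest) = pvCut (num ++ [c]) rest + 1 by
              simp [pvCut, hd, hb4]]
        rw [ih _ hn']
        have hokeq : pvOk2 ((num ++ (pvIdp (c :: rest)).map (fun p => p.2)).take 4) =
            pvOk2 (((num ++ [c]) ++ (pvIdp rest).map (fun p => p.2)).take 4) := by
          rw [hms]; simp
        by_cases hc : 4 ≤ (num ++ [c]).length + (pvIdp rest).length ∧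
            pvOk2 (((num ++ [c]) ++ (pvIdp rest).map (fun p => p.2)).take 4) = true
        · have hc' : 4 ≤ num.length + (pvIdp (c :: rest)).length ∧
              pvOk2 ((num ++ (pvIdp (c :: rest)).map (fun p => p.2)).take 4) = true := by
            refine ⟨by rw [hlen]; have := hc.1; simp at this; omega, by rw [hokeq]; exact hc.2⟩
          have hrange : 3 - (num ++ [c]).length < (pvIdp rest).length := by
            have := hc.1; simp at this; omega
          rw [if_pos hc, if_pos hc', hidp,
            show 3 - num.length = (3 - (num ++ [c]).length) + 1 by simp; omega,
            List.getD_cons_succ, pvGetD_shift _ _ _ hrange]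
        · have hc' : ¬ (4 ≤ num.length + (pvIdp (c :: rest)).length ∧
              pvOk2 ((num ++ (pvIdp (c :: rest)).map (fun p => p.2)).take 4) = true) := by
            rintro ⟨h1, h2⟩
            exact hc ⟨by rw [hlen] at h1; simp; omega, by rw [hokeq] at h2; exact h2⟩
          rw [if_neg hc, if_neg hc']
          simp
    · -- not a digit: positions shift, the digit sequence is unchanged
      have hidp : pvIdp (c :: rest) = (pvIdp rest).map (fun p => (p.1 + 1, p.2)) := by
        simp [pvIdp, hd]
      have hms : (pvIdp (c :: rest)).map (fun p => p.2) = (pvIdp rest).map (fun p => p.2) := by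
        rw [hidp]; simp
      have hlen : (pvIdp (c :: rest)).length = (pvIdp rest).length := by rw [hidp]; simp
      rw [show pvCut num (c :: rest) = pvCut num rest + 1 by simp [pvCut, hd]]
      rw [ih _ hn]
      by_cases hc : 4 ≤ num.length + (pvIdp rest).length ∧
          pvOk2 ((num ++ (pvIdp rest).map (fun p => p.2)).take 4) = true
      · have hc' : 4 ≤ num.length + (pvIdp (c :: rest)).length ∧
            pvOk2 ((num ++ (pvIdp (c :: rest)).map (fun p => p.2)).take 4) = true := by
          rw [hms, hlen]; exact hc
        have hrange : 3 - num.length < (pvIdp rest).length := by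
          have := hc.1; omega
        rw [if_pos hc, if_pos hc', hidp, pvGetD_shift _ _ _ hrange]
      · have hc' : ¬ (4 ≤ num.length + (pvIdp (c :: rest)).length ∧
            pvOk2 ((num ++ (pvIdp (c :: rest)).map (fun p => p.2)).take 4) = true) := by
          rw [hms, hlen]; exact hc
        rw [if_neg hc, if_neg hc']
        simp

-- B's pairs are exactly pvIdp with Int-cast positions
theorem pvPairs_eq (cs : List Char) : ∀ s : Int,
    (PySem.List.enumerate cs s).filter (fun p => PySem.Chars.isdigit p.2) =
      (pvIdp cs).map (fun p => ((s + p.1 : Int), p.2)) := by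
  induction cs with
  | nil => intro s; simp [PySem.List.enumerate, pvIdp]
  | cons c rest ih =>
    intro s
    rw [PySem.List.enumerate_cons, List.filter_cons]
    by_cases hd : PySem.Chars.isdigit c <;>
      simp [hd, pvIdp, ih (s + 1), List.map_map, Function.comp] <;>
      intro a b _ <;> ring

theorem pvCut_zero (cs : List Char) : pvCut [] cs = pvCutN cs := by
  rw [pvCut_eq cs [] (by simp), pvCutN]
  simp [List.map_take]

-- ===== VERDICT (by name: the statement is the Claim_ definition above) =====
theorem text_reader_spec : Claim_equal_text_reader := by
  intro text _
  unfold Spec_text_reader text_reader text_reader_alt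
  rw [pvLoopA_eq_take, pvCut_zero]
  simp only [List.nil_append]
  congr 3
  rw [pvPairs_eq text.toList 0]
  simp only [zero_add]
  set l := pvIdp text.toList with hl
  simp only [List.length_map]
  by_cases h4 : 4 ≤ l.length
  · rw [if_pos h4]
    have hslice : PySem.List.slice (l.map (fun p => ((p.1 : Int), p.2))) none (some 4) =
        (l.take 4).map (fun p => ((p.1 : Int), p.2)) := by
      rw [PySem.List.slice_to (l.map (fun p => ((p.1 : Int), p.2))) (by norm_num)]
      simp [List.map_take]
    rw [hslice]
    have hsnd : (((l.take 4).map (fun p => ((p.1 : Int), p.2))).map (fun p => p.2)) =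
        (l.take 4).map (fun p => p.2) := by
      simp [List.map_map, Function.comp_def]
    rw [hsnd]
    have hfst : 4 ≤ l.length →
        (l.map (fun p => ((p.1 : Int), p.2))).getD 3 ((0 : Int), ' ') =
          (((l.getD 3 (0, ' ')).1 : Int), (l.getD 3 (0, ' ')).2) := by
      intro hlen
      have h3 : 3 < l.length := by omega
      simp [List.getD_eq_getElem?_getD, h3]
    by_cases hok : pvOk2 ((l.take 4).map (fun p => p.2)) = true
    · rw [if_pos hok, pvCutN, if_pos ⟨h4, hok⟩]
      rw [PySem.List.pyGetD_ofNat', hfst h4]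
      rw [PySem.List.slice_to text.toList (by positivity)]
      congr 1
    · rw [if_neg hok, pvCutN, if_neg (by rintro ⟨_, h⟩; exact hok h)]
      rw [PySem.List.slice_to text.toList (by positivity)]
      simp
  · rw [if_neg h4, pvCutN, if_neg (by rintro ⟨h, _⟩; exact h4 h)]
    rw [PySem.List.slice_to text.toList (by positivity)]
    simp
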